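-- pv_equiv track=rewrite | github.com/wodmuer/protmodcon_pux | protmodcon.py | filter_positions_with_all_categories
-- ===== SOURCE A (Python) =====
-- def filter_positions_with_all_categories(protein_id_annotation_position, sec_ids=[], domain_ids=[], protein_ids=[]):
--     """
--     Filter positions in protein_id_annotation_position to only include positions
--     that have annotations from specified categories (AA, sec, domain).
--     Only filters for categories where IDs lists are non-empty.
--     """
--     if not any([sec_ids, domain_ids, protein_ids]):
--         return protein_id_annotation_position
--
--     result = {}
--
--     # First filter proteins by protein_ids if provided
--     proteins_to_process = protein_id_annotation_position
--     if protein_ids: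
--         proteins_to_process = {pid: annotations for pid, annotations in protein_id_annotation_position.items()
--                               if pid in protein_ids}
--
--     # If we're only filtering by protein_ids and no other filters are active, just return the filtered proteins
--     if not any([sec_ids, domain_ids]):
--         return proteins_to_process
--
--     # Process each selected protein
--     for protein_id, annotations in proteins_to_process.items():
--         # Create position sets for each annotation type we need to filter for
--         positions_by_type = {}
--         if sec_ids:
--             positions_by_type['sec'] = set()
--         if domain_ids:
--             positions_by_type['domain'] = set()
--
--         # Track which positions have which annotations
--         position_annotations = {}
--
--         # Process all annotations in this protein
--         for annotation, positions in annotations.items():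
--             # Check if this is a secondary structure annotation we're interested in
--             if sec_ids and annotation in sec_ids:
--                 for pos in positions:
--                     positions_by_type['sec'].add(pos)
--                     if pos not in position_annotations:
--                         position_annotations[pos] = {'aa': [], 'sec': [], 'domain': []}
--                     position_annotations[pos]['sec'].append(annotation)
--
--             # Check if this is a domain annotation we're interested in
--             elif domain_ids and annotation in domain_ids:
--                 for pos in positions:
--                     positions_by_type['domain'].add(pos)
--                     if pos not in position_annotations:
--                         position_annotations[pos] = {'aa': [], 'sec': [], 'domain': []}
--                     position_annotations[pos]['domain'].append(annotation)
--
--         # Find positions that exist in all requested annotation types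
--         shared_positions = None
--         for req_type, positions in positions_by_type.items():
--             if shared_positions is None:
--                 shared_positions = positions
--             else:
--                 shared_positions = shared_positions.intersection(positions)
--
--         # If no shared positions found, skip this protein
--         if shared_positions is not None and not shared_positions:
--             continue
--
--         # Create result dictionary with only the annotations that apply to shared positions
--         protein_result = {}
--         for annotation, positions in annotations.items():
--             # If we have no filtering criteria other than protein_id, include all positions
--             if shared_positions is None:
--                 protein_result[annotation] = positions
--                 continue
--
--             # Keep only positions that are in the shared set
--             filtered_positions = [pos for pos in positions if pos in shared_positions]
--             if filtered_positions:
--                 protein_result[annotation] = filtered_positions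
--
--         result[protein_id] = protein_result
--
--     return result
-- ===== SOURCE B (Python) =====
-- def filter_positions_with_all_categories(protein_id_annotation_position, sec_ids=[], domain_ids=[], protein_ids=[]):
--     if not (sec_ids or domain_ids or protein_ids):
--         return protein_id_annotation_position
--     if protein_ids:
--         proteins = {pid: anns for pid, anns in protein_id_annotation_position.items()
--                     if pid in protein_ids}
--     else:
--         proteins = protein_id_annotation_position
--     if not (sec_ids or domain_ids):
--         return proteins
--     need = (1 if sec_ids else 0) + (1 if domain_ids else 0)
--     result = {}
--     for pid, anns in proteins.items():
--         # one pass: map position -> set of requested category names covering it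
--         cover = {}
--         for ann, positions in anns.items():
--             if sec_ids and ann in sec_ids:
--                 cat = 'sec'
--             elif domain_ids and ann in domain_ids:
--                 cat = 'domain'
--             else:
--                 continue
--             for pos in positions:
--                 cover.setdefault(pos, set()).add(cat)
--         shared = {pos for pos, cats in cover.items() if len(cats) == need}
--         if not shared:
--             continue
--         protein_result = {}
--         for ann, positions in anns.items():
--             kept = [p for p in positions if p in shared]
--             if kept:
--                 protein_result[ann] = kept
--         result[pid] = protein_result
--     return result
-- ===== Notes on version B (the rewrite author's own statement) =====
-- stated objective: alternative
-- what changed: Per protein, A builds one position-set per requested category plus an unused position_annotations dict and intersects the sets; B makes a single pass building one dict mapping each position to the set of requested categories covering it and keeps positions whose category count equals the number of requested categories.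
import Mathlib
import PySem

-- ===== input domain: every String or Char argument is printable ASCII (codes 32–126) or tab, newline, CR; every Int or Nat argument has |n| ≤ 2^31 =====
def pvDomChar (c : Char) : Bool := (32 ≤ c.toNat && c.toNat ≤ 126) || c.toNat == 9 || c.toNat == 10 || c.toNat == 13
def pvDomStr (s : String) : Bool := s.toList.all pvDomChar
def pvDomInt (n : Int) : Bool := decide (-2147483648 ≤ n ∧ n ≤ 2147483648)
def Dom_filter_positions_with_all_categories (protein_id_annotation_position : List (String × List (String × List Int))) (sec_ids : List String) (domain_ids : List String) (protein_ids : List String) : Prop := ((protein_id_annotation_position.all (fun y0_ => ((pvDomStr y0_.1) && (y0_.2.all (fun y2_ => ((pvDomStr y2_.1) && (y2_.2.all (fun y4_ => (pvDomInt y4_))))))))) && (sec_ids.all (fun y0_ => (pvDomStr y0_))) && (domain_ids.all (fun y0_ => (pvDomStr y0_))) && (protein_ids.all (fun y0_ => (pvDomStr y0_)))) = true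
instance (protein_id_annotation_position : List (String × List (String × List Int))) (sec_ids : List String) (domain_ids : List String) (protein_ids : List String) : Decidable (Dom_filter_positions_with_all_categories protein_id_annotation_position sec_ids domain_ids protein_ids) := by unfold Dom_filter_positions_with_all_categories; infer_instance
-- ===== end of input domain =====

-- B replaces A's per-category position sets plus an intersection pass by a single
-- position → covering-categories dict per protein (alternative decomposition, same cost).

-- ===== PORT A =====
-- A's inner 'for pos in positions: set.add(pos)' is PySem.Set.update (= foldl Set.add);
-- A's position_annotations dict is written but never read afterwards, so it is not carried;
-- result dicts get each key at most once (Python dict inputs), so they are built by appending.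
def pvA_sets (sec_ids domain_ids : List String) (anns : List (String × List Int)) :
    PySem.Set Int × PySem.Set Int :=
  anns.foldl
    (fun st ap =>
      if sec_ids ≠ [] ∧ ap.1 ∈ sec_ids then (PySem.Set.update st.1 ap.2, st.2)
      else if domain_ids ≠ [] ∧ ap.1 ∈ domain_ids then (st.1, PySem.Set.update st.2 ap.2)
      else st)
    (PySem.Set.empty, PySem.Set.empty)

def pvA_shared (sec_ids domain_ids : List String) (secS domS : PySem.Set Int) :
    Option (PySem.Set Int) :=
  ((if sec_ids ≠ [] then [("sec", secS)] else []) ++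
   (if domain_ids ≠ [] then [("domain", domS)] else [])).foldl
    (fun acc kv => match acc with
      | none => some kv.2
      | some s => some (PySem.Set.inter s kv.2)) none

def pvA_rebuild (shared : Option (PySem.Set Int)) (anns : List (String × List Int)) :
    List (String × List Int) :=
  anns.foldl
    (fun pr ap =>
      match shared with
      | none => pr ++ [ap]
      | some s =>
        let fp := ap.2.filter (fun p => PySem.Set.contains s p)
        if fp ≠ [] then pr ++ [(ap.1, fp)] else pr) []

def filter_positions_with_all_categories (protein_id_annotation_position : List (String × List (String × List Int))) (sec_ids : List String) (domain_ids : List String) (protein_ids : List String) : List (String × List (String × List Int)) :=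
  if sec_ids = [] ∧ domain_ids = [] ∧ protein_ids = [] then
    protein_id_annotation_position
  else
    let proteins_to_process :=
      if protein_ids ≠ [] then
        protein_id_annotation_position.filter (fun pr => protein_ids.contains pr.1)
      else protein_id_annotation_position
    if sec_ids = [] ∧ domain_ids = [] then proteins_to_process
    else
      proteins_to_process.foldl
        (fun res pr =>
          let st := pvA_sets sec_ids domain_ids pr.2
          let shared := pvA_shared sec_ids domain_ids st.1 st.2
          if (match shared with | some s => decide (s = []) | none => false) then res
          else res ++ [(pr.1, pvA_rebuild shared pr.2)])
        []

-- ===== PORT B =====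
-- 'cover.setdefault(pos, set()).add(cat)' is Dict.modify pos ∅ (·.add cat) (d[k] = f(d.get(k, ∅)));
-- the set comprehension 'shared' is consumed only through membership/emptiness, so order is safe.
def pvB_cover (sec_ids domain_ids : List String) (anns : List (String × List Int)) :
    PySem.Dict Int (PySem.Set String) :=
  anns.foldl
    (fun cover ap =>
      let cat? : Option String :=
        if sec_ids ≠ [] ∧ ap.1 ∈ sec_ids then some "sec"
        else if domain_ids ≠ [] ∧ ap.1 ∈ domain_ids then some "domain"
        else none
      match cat? with
      | none => cover
      | some cat =>
        ap.2.foldl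
          (fun c pos => c.modify pos PySem.Set.empty (fun s => PySem.Set.add s cat)) cover)
    PySem.Dict.empty

def pvB_shared (need : Int) (cover : PySem.Dict Int (PySem.Set String)) : PySem.Set Int :=
  PySem.Set.ofList
    ((cover.items.filter (fun pc => PySem.Set.len pc.2 == need)).map (·.1))

def pvB_rebuild (shared : PySem.Set Int) (anns : List (String × List Int)) :
    List (String × List Int) :=
  anns.foldl
    (fun pr ap =>
      let kept := ap.2.filter (fun p => PySem.Set.contains shared p)
      if kept ≠ [] then pr ++ [(ap.1, kept)] else pr) []

def filter_positions_with_all_categories_alt (protein_id_annotation_position : List (String × List (String × List Int))) (sec_ids : List String) (domain_ids : List String) (protein_ids : List String) : List (String × List (String × List Int)) :=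
  if sec_ids = [] ∧ domain_ids = [] ∧ protein_ids = [] then
    protein_id_annotation_position
  else
    let proteins :=
      if protein_ids ≠ [] then
        protein_id_annotation_position.filter (fun pr => protein_ids.contains pr.1)
      else protein_id_annotation_position
    if sec_ids = [] ∧ domain_ids = [] then proteins
    else
      let need : Int :=
        (if sec_ids ≠ [] then 1 else 0) + (if domain_ids ≠ [] then 1 else 0)
      proteins.foldl
        (fun res pr =>
          let shared := pvB_shared need (pvB_cover sec_ids domain_ids pr.2)
          if shared = [] then res
          else res ++ [(pr.1, pvB_rebuild shared pr.2)])
        []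

-- ===== PRECONDITION & SPEC =====
def Spec_filter_positions_with_all_categories (protein_id_annotation_position : List (String × List (String × List Int))) (sec_ids : List String) (domain_ids : List String) (protein_ids : List String) (out : List (String × List (String × List Int))) : Prop := out = filter_positions_with_all_categories_alt protein_id_annotation_position sec_ids domain_ids protein_ids
instance (protein_id_annotation_position : List (String × List (String × List Int))) (sec_ids : List String) (domain_ids : List String) (protein_ids : List String) (out : List (String × List (String × List Int))) : Decidable (Spec_filter_positions_with_all_categories protein_id_annotation_position sec_ids domain_ids protein_ids out) := by unfold Spec_filter_positions_with_all_categories; infer_instance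

-- ===== CLAIM (what is proved, stated in full; the proofs are below) =====
def Claim_equal_filter_positions_with_all_categories : Prop := ∀ (protein_id_annotation_position : List (String × List (String × List Int))) (sec_ids : List String) (domain_ids : List String) (protein_ids : List String), Dom_filter_positions_with_all_categories protein_id_annotation_position sec_ids domain_ids protein_ids → Spec_filter_positions_with_all_categories protein_id_annotation_position sec_ids domain_ids protein_ids (filter_positions_with_all_categories protein_id_annotation_position sec_ids domain_ids protein_ids)

-- ===== LEMMAS AND PROOFS =====

-- joint invariant relating A's two position sets to B's cover dict
def pvInv (secS domS : PySem.Set Int) (cover : PySem.Dict Int (PySem.Set String)) : Prop :=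
  cover.keys.Nodup ∧
  ∀ p : Int,
    ("sec" ∈ cover.getD p PySem.Set.empty ↔ p ∈ secS) ∧
    ("domain" ∈ cover.getD p PySem.Set.empty ↔ p ∈ domS) ∧
    (cover.getD p PySem.Set.empty).Nodup ∧
    (∀ x ∈ cover.getD p PySem.Set.empty, x = "sec" ∨ x = "domain")

theorem pvInv_empty : pvInv PySem.Set.empty PySem.Set.empty PySem.Dict.empty := by
  refine ⟨PySem.Dict.nodup_keys_empty, fun p => ?_⟩
  simp [PySem.Dict.getD_empty, PySem.Set.empty]

theorem pvInv_modify_sec (pos : Int) (secS domS : PySem.Set Int)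
    (cover : PySem.Dict Int (PySem.Set String)) (h : pvInv secS domS cover) :
    pvInv (PySem.Set.add secS pos) domS
      (cover.modify pos PySem.Set.empty (fun s => PySem.Set.add s "sec")) := by
  obtain ⟨hnd, hp⟩ := h
  refine ⟨?_, fun q => ?_⟩
  · rw [PySem.Dict.keys_modify]
    by_cases hc : cover.contains pos = true
    · rw [PySem.Dict.keys_insert_of_contains _ _ hc]; exact hnd
    · rw [PySem.Dict.keys_insert_of_not_contains _ _ (by simpa using hc)]
      have hnm : pos ∉ cover.keys := fun hm =>
        hc ((PySem.Dict.contains_iff_mem_keys _ _).2 hm)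
      exact hnd.append (List.nodup_singleton _)
        (fun a ha hb => by simp only [List.mem_singleton] at hb; exact hnm (hb ▸ ha))
  · obtain ⟨h1, h2, h3, h4⟩ := hp q
    rw [PySem.Dict.getD_modify]
    by_cases hq : q = pos
    · subst hq
      refine ⟨?_, ?_, ?_, ?_⟩ <;> simp only [if_pos trivial]
      · simp [PySem.Set.mem_add]
      · rw [PySem.Set.mem_add]
        simp only [show ("domain" : String) ≠ "sec" by decide, or_false]
        exact h2
      · exact PySem.Set.nodup_add _ _ h3
      · intro x hx
        rcases (PySem.Set.mem_add _ _ _).1 hx with hx' | hx'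
        · exact h4 x hx'
        · exact Or.inl hx'
    · simp only [if_neg hq]
      refine ⟨?_, h2, h3, h4⟩
      rw [h1, PySem.Set.mem_add]
      simp [hq]

theorem pvInv_modify_dom (pos : Int) (secS domS : PySem.Set Int)
    (cover : PySem.Dict Int (PySem.Set String)) (h : pvInv secS domS cover) :
    pvInv secS (PySem.Set.add domS pos)
      (cover.modify pos PySem.Set.empty (fun s => PySem.Set.add s "domain")) := by
  obtain ⟨hnd, hp⟩ := h
  refine ⟨?_, fun q => ?_⟩
  · rw [PySem.Dict.keys_modify]
    by_cases hc : cover.contains pos = true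
    · rw [PySem.Dict.keys_insert_of_contains _ _ hc]; exact hnd
    · rw [PySem.Dict.keys_insert_of_not_contains _ _ (by simpa using hc)]
      have hnm : pos ∉ cover.keys := fun hm =>
        hc ((PySem.Dict.contains_iff_mem_keys _ _).2 hm)
      exact hnd.append (List.nodup_singleton _)
        (fun a ha hb => by simp only [List.mem_singleton] at hb; exact hnm (hb ▸ ha))
  · obtain ⟨h1, h2, h3, h4⟩ := hp q
    rw [PySem.Dict.getD_modify]
    by_cases hq : q = pos
    · subst hq
      refine ⟨?_, ?_, ?_, ?_⟩ <;> simp only [if_pos trivial]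
      · rw [PySem.Set.mem_add]
        simp only [show ("sec" : String) ≠ "domain" by decide, or_false]
        exact h1
      · simp [PySem.Set.mem_add]
      · exact PySem.Set.nodup_add _ _ h3
      · intro x hx
        rcases (PySem.Set.mem_add _ _ _).1 hx with hx' | hx'
        · exact h4 x hx'
        · exact Or.inr hx'
    · simp only [if_neg hq]
      refine ⟨h1, ?_, h3, h4⟩
      rw [h2, PySem.Set.mem_add]
      simp [hq]

theorem pvInv_step_sec (positions : List Int) : ∀ (secS domS : PySem.Set Int)
    (cover : PySem.Dict Int (PySem.Set String)), pvInv secS domS cover →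
    pvInv (PySem.Set.update secS positions) domS
      (positions.foldl
        (fun c pos => c.modify pos PySem.Set.empty (fun s => PySem.Set.add s "sec")) cover) := by
  induction positions with
  | nil => intro secS domS cover h; simpa [PySem.Set.update] using h
  | cons a t ih =>
    intro secS domS cover h
    rw [PySem.Set.update_cons]
    exact ih _ _ _ (pvInv_modify_sec a secS domS cover h)

theorem pvInv_step_dom (positions : List Int) : ∀ (secS domS : PySem.Set Int)
    (cover : PySem.Dict Int (PySem.Set String)), pvInv secS domS cover →
    pvInv secS (PySem.Set.update domS positions)
      (positions.foldl
        (fun c pos => c.modify pos PySem.Set.empty (fun s => PySem.Set.add s "domain")) cover) := by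
  induction positions with
  | nil => intro secS domS cover h; simpa [PySem.Set.update] using h
  | cons a t ih =>
    intro secS domS cover h
    rw [PySem.Set.update_cons]
    exact ih _ _ _ (pvInv_modify_dom a secS domS cover h)

theorem pvInv_fold (sec_ids domain_ids : List String) (anns : List (String × List Int)) :
    ∀ (st : PySem.Set Int × PySem.Set Int) (cover : PySem.Dict Int (PySem.Set String)),
    pvInv st.1 st.2 cover →
    pvInv (anns.foldl
        (fun st ap =>
          if sec_ids ≠ [] ∧ ap.1 ∈ sec_ids then (PySem.Set.update st.1 ap.2, st.2)
          else if domain_ids ≠ [] ∧ ap.1 ∈ domain_ids then (st.1, PySem.Set.update st.2 ap.2)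
          else st) st).1
      (anns.foldl
        (fun st ap =>
          if sec_ids ≠ [] ∧ ap.1 ∈ sec_ids then (PySem.Set.update st.1 ap.2, st.2)
          else if domain_ids ≠ [] ∧ ap.1 ∈ domain_ids then (st.1, PySem.Set.update st.2 ap.2)
          else st) st).2
      (anns.foldl
        (fun cover ap =>
          let cat? : Option String :=
            if sec_ids ≠ [] ∧ ap.1 ∈ sec_ids then some "sec"
            else if domain_ids ≠ [] ∧ ap.1 ∈ domain_ids then some "domain"
            else none
          match cat? with
          | none => cover
          | some cat =>
            ap.2.foldl
              (fun c pos => c.modify pos PySem.Set.empty (fun s => PySem.Set.add s cat)) cover)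
        cover) := by
  induction anns with
  | nil => intro st cover h; exact h
  | cons a t ih =>
    intro st cover h
    simp only [List.foldl_cons]
    by_cases hs : sec_ids ≠ [] ∧ a.1 ∈ sec_ids
    · simp only [if_pos hs]
      exact ih _ _ (pvInv_step_sec a.2 st.1 st.2 cover h)
    · simp only [if_neg hs]
      by_cases hd : domain_ids ≠ [] ∧ a.1 ∈ domain_ids
      · simp only [if_pos hd]
        exact ih _ _ (pvInv_step_dom a.2 st.1 st.2 cover h)
      · simp only [if_neg hd]
        exact ih _ _ h

theorem pvInv_holds (sec_ids domain_ids : List String) (anns : List (String × List Int)) :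
    pvInv (pvA_sets sec_ids domain_ids anns).1 (pvA_sets sec_ids domain_ids anns).2
      (pvB_cover sec_ids domain_ids anns) :=
  pvInv_fold sec_ids domain_ids anns (PySem.Set.empty, PySem.Set.empty) PySem.Dict.empty pvInv_empty

-- membership in B's shared set, via the cover lookup
theorem pvB_shared_mem (need : Int) (hneed : 1 ≤ need)
    (cover : PySem.Dict Int (PySem.Set String)) (hnd : cover.keys.Nodup) (p : Int) :
    p ∈ pvB_shared need cover ↔
      ((cover.getD p PySem.Set.empty).length : Int) = need := by
  unfold pvB_shared
  rw [PySem.Set.mem_ofList]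
  simp only [List.mem_map, List.mem_filter]
  constructor
  · rintro ⟨⟨k, v⟩, ⟨hmem, hlen⟩, rfl⟩
    have := PySem.Dict.getD_of_mem_items cover hmem hnd PySem.Set.empty
    rw [this]
    simpa [PySem.Set.len] using hlen
  · intro hlen
    by_cases hc : cover.contains p = true
    · rw [PySem.Dict.contains_eq_isSome_get?] at hc
      obtain ⟨v, hv⟩ := Option.isSome_iff_exists.1 hc
      have hgd : cover.getD p PySem.Set.empty = v := by
        rw [PySem.Dict.getD_eq_get?_getD, hv]; rfl
      refine ⟨(p, v), ⟨(PySem.Dict.get?_eq_some_iff_mem_items cover p v hnd).1 hv, ?_⟩, rfl⟩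
      rw [hgd] at hlen
      simpa [PySem.Set.len] using hlen
    · exfalso
      rw [PySem.Dict.getD_of_not_contains _ _ (by simpa using hc)] at hlen
      simp only [PySem.Set.empty, List.length_nil, Nat.cast_zero] at hlen
      omega

-- a Nodup list over {"sec","domain"} has length 2 iff both are present
theorem pvTwoLen (c : List String) (hnd : c.Nodup)
    (hsub : ∀ x ∈ c, x = "sec" ∨ x = "domain") :
    c.length = 2 ↔ ("sec" ∈ c ∧ "domain" ∈ c) := by
  rcases c with _ | ⟨a, _ | ⟨b, _ | ⟨e, t⟩⟩⟩
  · simp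
  · rcases hsub a (by simp) with rfl | rfl <;> simp
  · rcases hsub a (by simp) with rfl | rfl <;>
      rcases hsub b (by simp) with rfl | rfl <;> simp_all
  · exfalso
    rcases hsub a (by simp) with rfl | rfl <;>
      rcases hsub b (by simp) with rfl | rfl <;>
      rcases hsub e (by simp) with h | h <;> simp_all

-- a Nodup list over {v} has length 1 iff v is present
theorem pvOneLen (c : List String) (v : String) (hnd : c.Nodup)
    (hsub : ∀ x ∈ c, x = v) : c.length = 1 ↔ v ∈ c := by
  rcases c with _ | ⟨a, _ | ⟨b, t⟩⟩
  · simp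
  · have := hsub a (by simp); subst this; simp
  · have h1 := hsub a (by simp)
    have h2 := hsub b (by simp)
    subst h1; subst h2; simp_all

-- when domain_ids = [], A's domain set stays empty (and symmetrically)
theorem pvA_sets_snd_nil (sec_ids domain_ids : List String) (hd : domain_ids = [])
    (anns : List (String × List Int)) :
    (pvA_sets sec_ids domain_ids anns).2 = PySem.Set.empty := by
  subst hd
  unfold pvA_sets
  suffices h : ∀ (anns : List (String × List Int)) (st : PySem.Set Int × PySem.Set Int),
      (anns.foldl (fun st ap =>
        if sec_ids ≠ [] ∧ ap.1 ∈ sec_ids then (PySem.Set.update st.1 ap.2, st.2)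
        else if ([] : List String) ≠ [] ∧ ap.1 ∈ ([] : List String) then
          (st.1, PySem.Set.update st.2 ap.2)
        else st) st).2 = st.2 from h anns _
  intro anns
  induction anns with
  | nil => intro st; rfl
  | cons a t ih =>
    intro st
    simp only [List.foldl_cons]
    split_ifs with h1 h2
    · exact ih _
    · exact absurd h2 (by simp)
    · exact ih _

theorem pvA_sets_fst_nil (sec_ids domain_ids : List String) (hs : sec_ids = [])
    (anns : List (String × List Int)) :
    (pvA_sets sec_ids domain_ids anns).1 = PySem.Set.empty := by
  subst hs
  unfold pvA_sets
  suffices h : ∀ (anns : List (String × List Int)) (st : PySem.Set Int × PySem.Set Int),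
      (anns.foldl (fun st ap =>
        if ([] : List String) ≠ [] ∧ ap.1 ∈ ([] : List String) then
          (PySem.Set.update st.1 ap.2, st.2)
        else if domain_ids ≠ [] ∧ ap.1 ∈ domain_ids then (st.1, PySem.Set.update st.2 ap.2)
        else st) st).1 = st.1 from h anns _
  intro anns
  induction anns with
  | nil => intro st; rfl
  | cons a t ih =>
    intro st
    simp only [List.foldl_cons]
    split_ifs with h1 h2
    · exact absurd h1 (by simp)
    · exact ih _
    · exact ih _

-- per-protein step equality given set-membership agreement
theorem pvStep_eq (sA sB : PySem.Set Int) (hm : ∀ q : Int, q ∈ sA ↔ q ∈ sB)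
    (pid : String) (anns : List (String × List Int))
    (res : List (String × List (String × List Int))) :
    (if (decide (sA = []) : Bool) then res else res ++ [(pid, pvA_rebuild (some sA) anns)]) =
    (if sB = [] then res else res ++ [(pid, pvB_rebuild sB anns)]) := by
  have hc : ∀ q : Int, PySem.Set.contains sA q = PySem.Set.contains sB q := by
    intro q
    rw [Bool.eq_iff_iff, PySem.Set.contains_iff, PySem.Set.contains_iff]
    exact hm q
  have hreb : pvA_rebuild (some sA) anns = pvB_rebuild sB anns := by
    unfold pvA_rebuild pvB_rebuild
    simp only [hc]
  have he : (sA = []) ↔ (sB = []) := by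
    simp only [List.eq_nil_iff_forall_not_mem]
    exact ⟨fun h q hq => h q ((hm q).2 hq), fun h q hq => h q ((hm q).1 hq)⟩
  by_cases hA : sA = []
  · simp [hA, he.1 hA]
  · simp only [hA, decide_false, Bool.false_eq_true, if_false, if_neg (fun h => hA (he.2 h)), hreb]

theorem pvA_shared_both (sec_ids domain_ids : List String) (hs : sec_ids ≠ [])
    (hd : domain_ids ≠ []) (s d : PySem.Set Int) :
    pvA_shared sec_ids domain_ids s d = some (PySem.Set.inter s d) := by
  simp [pvA_shared, hs, hd]

theorem pvA_shared_sec (sec_ids domain_ids : List String) (hs : sec_ids ≠ [])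
    (hd : domain_ids = []) (s d : PySem.Set Int) :
    pvA_shared sec_ids domain_ids s d = some s := by
  simp [pvA_shared, hs, hd]

theorem pvA_shared_dom (sec_ids domain_ids : List String) (hs : sec_ids = [])
    (hd : domain_ids ≠ []) (s d : PySem.Set Int) :
    pvA_shared sec_ids domain_ids s d = some d := by
  simp [pvA_shared, hs, hd]

theorem pvMem_both (sec_ids domain_ids : List String) (anns : List (String × List Int)) (q : Int) :
    q ∈ PySem.Set.inter (pvA_sets sec_ids domain_ids anns).1 (pvA_sets sec_ids domain_ids anns).2 ↔
      q ∈ pvB_shared 2 (pvB_cover sec_ids domain_ids anns) := by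
  obtain ⟨hnd, hp⟩ := pvInv_holds sec_ids domain_ids anns
  obtain ⟨h1, h2, h3, h4⟩ := hp q
  rw [PySem.Set.mem_inter, pvB_shared_mem 2 (by norm_num) _ hnd, ← h1, ← h2]
  rw [show ((((pvB_cover sec_ids domain_ids anns).getD q PySem.Set.empty).length : Int) = 2) ↔
      (((pvB_cover sec_ids domain_ids anns).getD q PySem.Set.empty).length = 2) by exact_mod_cast Iff.rfl]
  exact (pvTwoLen _ h3 h4).symm

theorem pvMem_sec (sec_ids domain_ids : List String) (hd : domain_ids = [])
    (anns : List (String × List Int)) (q : Int) :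
    q ∈ (pvA_sets sec_ids domain_ids anns).1 ↔
      q ∈ pvB_shared 1 (pvB_cover sec_ids domain_ids anns) := by
  obtain ⟨hnd, hp⟩ := pvInv_holds sec_ids domain_ids anns
  obtain ⟨h1, h2, h3, h4⟩ := hp q
  have hempty := pvA_sets_snd_nil sec_ids domain_ids hd anns
  have hnodom : "domain" ∉ (pvB_cover sec_ids domain_ids anns).getD q PySem.Set.empty := by
    intro hm
    have := h2.1 hm
    rw [hempty] at this
    simp [PySem.Set.empty] at this
  have hsub : ∀ x ∈ (pvB_cover sec_ids domain_ids anns).getD q PySem.Set.empty, x = "sec" :=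
    fun x hx => (h4 x hx).resolve_right (fun h => hnodom (h ▸ hx))
  rw [pvB_shared_mem 1 (by norm_num) _ hnd, ← h1]
  rw [show ((((pvB_cover sec_ids domain_ids anns).getD q PySem.Set.empty).length : Int) = 1) ↔
      (((pvB_cover sec_ids domain_ids anns).getD q PySem.Set.empty).length = 1) by exact_mod_cast Iff.rfl]
  exact (pvOneLen _ "sec" h3 hsub).symm

theorem pvMem_dom (sec_ids domain_ids : List String) (hs : sec_ids = [])
    (anns : List (String × List Int)) (q : Int) :
    q ∈ (pvA_sets sec_ids domain_ids anns).2 ↔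
      q ∈ pvB_shared 1 (pvB_cover sec_ids domain_ids anns) := by
  obtain ⟨hnd, hp⟩ := pvInv_holds sec_ids domain_ids anns
  obtain ⟨h1, h2, h3, h4⟩ := hp q
  have hempty := pvA_sets_fst_nil sec_ids domain_ids hs anns
  have hnosec : "sec" ∉ (pvB_cover sec_ids domain_ids anns).getD q PySem.Set.empty := by
    intro hm
    have := h1.1 hm
    rw [hempty] at this
    simp [PySem.Set.empty] at this
  have hsub : ∀ x ∈ (pvB_cover sec_ids domain_ids anns).getD q PySem.Set.empty, x = "domain" :=
    fun x hx => (h4 x hx).resolve_left (fun h => hnosec (h ▸ hx))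
  rw [pvB_shared_mem 1 (by norm_num) _ hnd, ← h2]
  rw [show ((((pvB_cover sec_ids domain_ids anns).getD q PySem.Set.empty).length : Int) = 1) ↔
      (((pvB_cover sec_ids domain_ids anns).getD q PySem.Set.empty).length = 1) by exact_mod_cast Iff.rfl]
  exact (pvOneLen _ "domain" h3 hsub).symm

-- ===== VERDICT (by name: the statement is the Claim_ definition above) =====
theorem filter_positions_with_all_categories_spec : Claim_equal_filter_positions_with_all_categories := by
  intro input sec_ids domain_ids protein_ids _hdom
  unfold Spec_filter_positions_with_all_categories
  unfold filter_positions_with_all_categories filter_positions_with_all_categories_alt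
  by_cases h0 : sec_ids = [] ∧ domain_ids = [] ∧ protein_ids = []
  · simp only [if_pos h0]
  · simp only [if_neg h0]
    by_cases h1 : sec_ids = [] ∧ domain_ids = []
    · simp only [if_pos h1]
    · simp only [if_neg h1]
      congr 1
      funext res pr
      by_cases hs : sec_ids = []
      · have hd : domain_ids ≠ [] := fun h => h1 ⟨hs, h⟩
        have hs' : ¬ (sec_ids ≠ []) := by simpa using hs
        simp only [pvA_shared_dom sec_ids domain_ids hs hd, if_neg hs', if_pos hd]
        exact pvStep_eq _ _ (pvMem_dom sec_ids domain_ids hs pr.2) pr.1 pr.2 res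
      · have hs : sec_ids ≠ [] := hs
        by_cases hd : domain_ids = []
        · have hd' : ¬ (domain_ids ≠ []) := by simpa using hd
          simp only [pvA_shared_sec sec_ids domain_ids hs hd, if_pos hs, if_neg hd']
          exact pvStep_eq _ _ (pvMem_sec sec_ids domain_ids hd pr.2) pr.1 pr.2 res
        · have hd : domain_ids ≠ [] := hd
          simp only [pvA_shared_both sec_ids domain_ids hs hd, if_pos hs, if_pos hd]
          have : ((1 : Int) + 1) = 2 := by norm_num
          rw [this]
          exact pvStep_eq _ _ (pvMem_both sec_ids domain_ids pr.2) pr.1 pr.2 res
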